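-- pv_equiv track=rewrite | github.com/RaviPabari/HackerRank-Problems | ProblemSolving/ACM ICPC Team.py | acmTeam
-- ===== SOURCE A (Python) =====
-- from itertools import combinations
--
-- def acmTeam(topic,n):
--     maxTeam = 0
--     maxKnownTopic = 0
--     comb = combinations(topic,2)
--     for i in comb:
--         n = bin(((int(i[0],2) | int(i[1],2)))).count('1')
--         if maxKnownTopic < n:
--             maxKnownTopic = n
--             maxTeam = 1
--         elif n == maxKnownTopic:
--             maxTeam +=1
--     return maxTeam , maxKnownTopic
-- ===== SOURCE B (Python) =====
-- def acmTeam(topic, n):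
--     # group equal attendee masks: parse each string once, count multiplicities
--     cnt = {}
--     for t in topic:
--         v = int(t, 2)
--         cnt[v] = cnt.get(v, 0) + 1
--     best = 0
--     ways = 0
--     rem = list(cnt)
--     while rem:
--         u, rem = rem[0], rem[1:]
--         cu = cnt[u]
--         if cu > 1:
--             s = bin(u).count('1')
--             w = cu * (cu - 1) // 2
--             if best < s:
--                 best, ways = s, w
--             elif s == best:
--                 ways += w
--         for v in rem:
--             s = bin(u | v).count('1')
--             w = cu * cnt[v]
--             if best < s:
--                 best, ways = s, w
--             elif s == best:
--                 ways += w
--     return ways, best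
-- ===== Notes on version B (the rewrite author's own statement) =====
-- stated objective: faster
-- what changed: Instead of streaming over all C(n,2) string pairs (re-parsing both strings per pair), B parses each string once into an int, groups equal masks with a counting dict, and aggregates over pairs of DISTINCT masks using multiplicity weights (cu*cv cross pairs, cu*(cu-1)/2 self pairs).
-- outside the precondition, e.g. on acmTeam(['xx'], 1): A returns (0, 0), B raises ValueError
import Mathlib
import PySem

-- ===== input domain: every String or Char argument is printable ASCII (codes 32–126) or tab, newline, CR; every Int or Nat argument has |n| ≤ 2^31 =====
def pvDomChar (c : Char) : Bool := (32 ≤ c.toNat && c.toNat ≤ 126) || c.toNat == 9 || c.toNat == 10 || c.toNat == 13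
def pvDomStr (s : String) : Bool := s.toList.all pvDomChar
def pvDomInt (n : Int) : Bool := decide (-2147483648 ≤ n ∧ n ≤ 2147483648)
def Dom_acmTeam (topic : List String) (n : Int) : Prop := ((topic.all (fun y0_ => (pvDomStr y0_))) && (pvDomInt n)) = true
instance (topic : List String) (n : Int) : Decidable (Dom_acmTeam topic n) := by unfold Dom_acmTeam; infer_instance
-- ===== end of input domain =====

-- B replaces A's streaming pass over all C(n,2) string pairs (re-parsing both strings per pair)
-- by: parse each string once, group equal masks in a counting dict, and aggregate over pairs of
-- DISTINCT masks with multiplicity weights (cu*cv cross pairs, cu*(cu-1)//2 self pairs); objective: faster.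


-- ===== PORT A =====
-- int(s, 2); none = ValueError, excluded by Pre_acmTeam, so the .getD 0 default never fires there
def pvParse2 (s : String) : Int := (PySem.Int.ofStrBase? s 2).getD 0

-- n = bin(int(i[0],2) | int(i[1],2)).count('1'); elements of combinations(topic,2) have
-- length 2, so the pyGetD defaults never fire and the indexing is exact
def pvScoreA (i : List String) : Int :=
  ((PySem.Str.count (PySem.Int.pyBin (PySem.Int.bor (pvParse2 (PySem.List.pyGetD i 0 "")) (pvParse2 (PySem.List.pyGetD i 1 "")))) "1" : Nat) : Int)

def pvStepA (st : Int × Int) (i : List String) : Int × Int :=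
  let n := pvScoreA i
  if st.2 < n then (1, n)
  else if n == st.2 then (st.1 + 1, st.2)
  else st

def acmTeam (topic : List String) (n : Int) : Int × Int :=
  (PySem.List.combinations topic 2).foldl pvStepA (0, 0)

-- ===== PORT B =====
-- bin(u | v).count('1') on the parsed masks
def pvScoreInt (u v : Int) : Int :=
  ((PySem.Str.count (PySem.Int.pyBin (PySem.Int.bor u v)) "1" : Nat) : Int)

-- the shared update of (ways, best) by a score s carrying weight w
def pvMerge (st : Int × Int) (s w : Int) : Int × Int :=
  if st.2 < s then (w, s)
  else if s == st.2 then (st.1 + w, st.2)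
  else st

-- the 'while rem:' loop: pop the first remaining key u, merge its self pairs
-- (weight cu*(cu-1)//2, only when cu > 1) and its cross pairs with every later key v
-- (weight cu*cnt[v]), then continue on the rest
def pvLoopB (cnt : PySem.Dict Int Int) : List Int → Int × Int → Int × Int
  | [], st => st
  | u :: rem, st =>
      let cu := cnt.getD u 0
      let st1 := if 1 < cu then pvMerge st (pvScoreInt u u) (PySem.Int.floordiv (cu * (cu - 1)) 2) else st
      pvLoopB cnt rem (rem.foldl (fun st2 v => pvMerge st2 (pvScoreInt u v) (cu * cnt.getD v 0)) st1)

def acmTeam_alt (topic : List String) (n : Int) : Int × Int :=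
  let cnt := topic.foldl (fun d t => let v := pvParse2 t; d.insert v (d.getD v 0 + 1)) PySem.Dict.empty
  pvLoopB cnt cnt.keys (0, 0)

-- ===== PRECONDITION & SPEC =====
-- Pre_ excludes exactly the inputs where some topic string is not a valid base-2 literal:
-- with ≥ 2 topics A's int(s,2) raises ValueError there, and B — which validates every string
-- up front — itself raises ValueError already for a single invalid topic (where A, never
-- entering its pair loop, still returns (0,0)).
def Pre_acmTeam (topic : List String) (n : Int) : Prop :=
  topic = [] ∨ ∀ s ∈ topic, (PySem.Int.ofStrBase? s 2).isSome = true
instance (topic : List String) (n : Int) : Decidable (Pre_acmTeam topic n) := by unfold Pre_acmTeam; infer_instance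
def pvWitness_acmTeam : List String × Int := (["101", "110", "01"], 3)
def Spec_acmTeam (topic : List String) (n : Int) (out : Int × Int) : Prop := out = acmTeam_alt topic n
instance (topic : List String) (n : Int) (out : Int × Int) : Decidable (Spec_acmTeam topic n out) := by unfold Spec_acmTeam; infer_instance

-- ===== CLAIM (what is proved, stated in full; the proofs are below) =====
def Claim_equal_acmTeam : Prop := ∀ (topic : List String) (n : Int), Dom_acmTeam topic n → Pre_acmTeam topic n → Spec_acmTeam topic n (acmTeam topic n)

-- ===== LEMMAS AND PROOFS =====

-- ---- proof-side vocabulary ----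

-- merge on a (score, weight) pair
def pvMergeP (st : Int × Int) (p : Int × Int) : Int × Int := pvMerge st p.1 p.2

-- the score list of all pairs of a mask list
def pvSA (l : List Int) : List Int :=
  (PySem.List.combinations l 2).map (fun p => pvScoreInt (PySem.List.pyGetD p 0 0) (PySem.List.pyGetD p 1 0))

-- the weighted (score, weight) items B merges, for key list ks and multiplicity c
def pvItems (c : Int → Int) : List Int → List (Int × Int)
  | [] => []
  | u :: ks =>
      (if 1 < c u then [(pvScoreInt u u, PySem.Int.floordiv (c u * (c u - 1)) 2)] else [])
        ++ ks.map (fun v => (pvScoreInt u v, c u * c v)) ++ pvItems c ks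

-- total weight of the items whose score is t
def pvWSum (L : List (Int × Int)) (t : Int) : Int :=
  (L.map (fun p => if p.1 = t then p.2 else 0)).sum

-- max of the scores of a weighted list (0 when empty)
def pvWMax (L : List (Int × Int)) : Int := (L.map Prod.fst).foldl max 0

-- the masks grouped by first occurrence: each distinct mask repeated by its multiplicity
def pvGrouped (l : List Int) : List Int :=
  (PySem.List.dedup l).flatMap (fun u => List.replicate (l.count u) u)

-- ---- facts ----

theorem pvScoreInt_comm (u v : Int) : pvScoreInt u v = pvScoreInt v u := by
  unfold pvScoreInt; rw [PySem.Int.bor_comm]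
theorem pvSA_nil : pvSA [] = [] := by simp [pvSA, PySem.List.combinations_nil_succ]
theorem pvSA_cons (x : Int) (l : List Int) :
    pvSA (x :: l) = l.map (pvScoreInt x) ++ pvSA l := by
  simp [pvSA, PySem.List.combinations_cons_succ, PySem.List.combinations_one, List.map_map]
  intro a ha
  simp [PySem.List.pyGetD, PySem.List.pyGet?, PySem.List.pyIdx?]
theorem pvSA_perm {l l' : List Int} (h : l.Perm l') : (pvSA l).Perm (pvSA l') := by
  induction h with
  | nil => exact List.Perm.refl _
  | cons x h ih =>
      rw [pvSA_cons, pvSA_cons]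
      exact (h.map _).append ih
  | swap x y l =>
      rw [pvSA_cons, pvSA_cons, pvSA_cons, pvSA_cons]
      simp only [List.map_cons, List.cons_append]
      rw [pvScoreInt_comm y x]
      exact (List.Perm.cons _ (List.perm_append_comm_assoc _ _ _))
  | trans h1 h2 ih1 ih2 => exact ih1.trans ih2
theorem pv_count_flatMap_rep (x : Int) (m : Int → Nat) (ks : List Int) (h : ks.Nodup) :
    (ks.flatMap (fun u => List.replicate (m u) u)).count x = if x ∈ ks then m x else 0 := by
  induction ks with
  | nil => simp
  | cons u ks ih =>
      simp only [List.flatMap_cons, List.count_append, ih (List.Nodup.of_cons h)]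
      rcases eq_or_ne x u with rfl | hne
      · have : x ∉ ks := (List.nodup_cons.mp h).1
        simp [this]
      · simp [List.count_replicate, hne, Ne.symm hne]
theorem pv_perm_grouped (l : List Int) : l.Perm (pvGrouped l) := by
  rw [List.perm_iff_count]
  intro x
  rw [pvGrouped, pv_count_flatMap_rep x _ _ (PySem.List.nodup_dedup l)]
  by_cases hx : x ∈ l
  · simp [hx]
  · simp [hx, List.count_eq_zero.mpr hx]

theorem pv_wsum_eq_zero (L : List (Int × Int)) (t : Int) (h : ∀ p ∈ L, p.1 ≠ t) :
    pvWSum L t = 0 := by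
  apply List.sum_eq_zero
  intro x hx
  obtain ⟨p, hp, rfl⟩ := List.mem_map.mp hx
  simp [h p hp]

theorem pv_wfold_inv (L : List (Int × Int)) :
    L.foldl pvMergeP (0, 0) = (pvWSum L (pvWMax L), pvWMax L) := by
  induction L using List.reverseRecOn with
  | nil => simp [pvWSum, pvWMax]
  | append_singleton L p ih =>
    have hmax := PySem.List.le_foldl_max (L.map Prod.fst) 0
    have hM' : pvWMax (L ++ [p]) = max (pvWMax L) p.1 := by
      simp [pvWMax, List.foldl_append]
    rw [List.foldl_append, List.foldl_cons, List.foldl_nil, ih, hM']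
    unfold pvMergeP pvMerge
    by_cases h1 : pvWMax L < p.1
    · have hzero : pvWSum L p.1 = 0 := by
        apply pv_wsum_eq_zero
        intro q hq hEq
        have : q.1 ≤ pvWMax L := hmax.2 q.1 (List.mem_map_of_mem hq)
        omega
      have hma : max (pvWMax L) p.1 = p.1 := by omega
      rw [if_pos h1, hma]
      simp [pvWSum, List.map_append]
      simp [pvWSum] at hzero
      simp [hzero]
    · have hma : max (pvWMax L) p.1 = pvWMax L := by omega
      rw [if_neg h1, hma]
      by_cases h2 : p.1 = pvWMax L
      · rw [if_pos (by simp [h2])]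
        simp [pvWSum, List.map_append, h2]
      · rw [if_neg (fun hc => h2 (beq_iff_eq.mp hc))]
        simp [pvWSum, List.map_append, h2]

theorem pv_max_attain (L : List Int) : L.foldl max 0 = 0 ∨ L.foldl max 0 ∈ L := by
  suffices h : ∀ (a : Int), L.foldl max a = a ∨ L.foldl max a ∈ L from h 0
  induction L with
  | nil => intro a; left; rfl
  | cons x l ih =>
      intro a
      rcases ih (max a x) with h | h
      · rcases max_choice a x with hm | hm
        · left; rw [List.foldl_cons, h, hm]
        · right; rw [List.foldl_cons, h, hm]; exact List.mem_cons_self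
      · right; exact List.mem_cons_of_mem _ h

theorem pv_max_mem_congr (L₁ L₂ : List Int) (h : ∀ x, x ∈ L₁ ↔ x ∈ L₂) :
    L₁.foldl max 0 = L₂.foldl max 0 := by
  have h1 := PySem.List.le_foldl_max L₁ 0
  have h2 := PySem.List.le_foldl_max L₂ 0
  apply le_antisymm
  · rcases pv_max_attain L₁ with he | hm
    · rw [he]; exact h2.1
    · exact h2.2 _ ((h _).mp hm)
  · rcases pv_max_attain L₂ with he | hm
    · rw [he]; exact h1.1
    · exact h1.2 _ ((h _).mpr hm)

theorem pv_scores_A (topic : List String) :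
    (PySem.List.combinations topic 2).map pvScoreA = pvSA (topic.map pvParse2) := by
  rw [pvSA, PySem.List.combinations_map, List.map_map]
  apply List.map_congr_left
  intro p hp
  match p, PySem.List.length_of_mem_combinations hp with
  | [a, b], _ =>
      simp [pvScoreA, pvScoreInt, Function.comp,
        PySem.List.pyGetD, PySem.List.pyGet?, PySem.List.pyIdx?]

theorem pv_loopB_eq (cnt : PySem.Dict Int Int) (ks : List Int) (st : Int × Int) :
    pvLoopB cnt ks st = (pvItems (fun u => cnt.getD u 0) ks).foldl pvMergeP st := by
  induction ks generalizing st with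
  | nil => rfl
  | cons u ks ih =>
      rw [pvLoopB, pvItems]
      rw [List.foldl_append, List.foldl_append, ih, List.foldl_map]
      congr 1
      by_cases h : 1 < cnt.getD u 0
      · simp [h, pvMergeP]
      · simp [h, pvMergeP]

theorem pv_count_peel (t u : Int) (m : Nat) (L : List Int) :
    (pvSA (List.replicate m u ++ L)).count t
      = (if pvScoreInt u u = t then m.choose 2 else 0) + m * ((L.map (pvScoreInt u)).count t)
        + (pvSA L).count t := by
  induction m with
  | zero => simp
  | succ m ih =>
      rw [List.replicate_succ, List.cons_append, pvSA_cons, List.count_append,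
        List.map_append, List.count_append, List.map_replicate, List.count_replicate, ih]
      have hch : (m + 1).choose 2 = m + m.choose 2 := by
        rw [Nat.choose_succ_succ, Nat.choose_one_right]
      rw [hch, Nat.succ_mul]
      simp only [beq_iff_eq]
      split_ifs with hs <;> omega

theorem pv_count_cross (t u : Int) (m : Int → Nat) (ks : List Int) :
    ((ks.flatMap (fun v => List.replicate (m v) v)).map (pvScoreInt u)).count t
      = (ks.map (fun v => if pvScoreInt u v = t then m v else 0)).sum := by
  induction ks with
  | nil => simp
  | cons v ks ih =>
      rw [List.flatMap_cons, List.map_append, List.count_append, ih,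
        List.map_replicate, List.count_replicate, List.map_cons, List.sum_cons]
      simp only [beq_iff_eq]

theorem pv_self_cast (t u : Int) (m : Nat) (hm : 1 ≤ m) :
    ((if pvScoreInt u u = t then m.choose 2 else 0 : Nat) : Int)
      = pvWSum (if 1 < ((m : Nat) : Int) then [(pvScoreInt u u, PySem.Int.floordiv (((m : Nat) : Int) * (((m : Nat) : Int) - 1)) 2)] else []) t := by
  by_cases hf : pvScoreInt u u = t
  · by_cases h2 : 2 ≤ m
    · rw [if_pos hf, if_pos (by exact_mod_cast h2)]
      simp only [pvWSum, List.map_cons, List.map_nil, List.sum_cons, List.sum_nil, if_pos hf, add_zero]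
      have hcast : ((m : Nat) : Int) * (((m : Nat) : Int) - 1) = ((m * (m - 1) : Nat) : Int) := by
        push_cast [Nat.cast_sub hm]; ring
      rw [hcast]
      rw [show (2 : Int) = ((2 : Nat) : Int) from rfl, PySem.Int.floordiv_natCast]
      rw [Nat.choose_two_right]
    · have h1 : m = 1 := by omega
      subst h1
      rw [if_pos hf]
      norm_num [pvWSum]
  · rw [if_neg hf]
    split_ifs
    · simp [pvWSum, if_neg hf]
    · simp [pvWSum]

theorem pv_cross_cast (t u : Int) (m : Int → Nat) (ks : List Int) :
    ((m u : Nat) : Int) * (((ks.map (fun v => if pvScoreInt u v = t then m v else 0)).sum : Nat) : Int)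
      = pvWSum (ks.map (fun v => (pvScoreInt u v, ((m u : Nat) : Int) * ((m v : Nat) : Int)))) t := by
  induction ks with
  | nil => simp [pvWSum]
  | cons v ks ih =>
      simp only [List.map_cons, List.sum_cons, pvWSum] at ih ⊢
      push_cast at ih ⊢
      by_cases hf : pvScoreInt u v = t
      · simp only [hf, if_true]
        rw [mul_add, ih]
      · simp only [if_neg hf]
        rw [mul_add, ih]
        simp

theorem pvWSum_append (L1 L2 : List (Int × Int)) (t : Int) :
    pvWSum (L1 ++ L2) t = pvWSum L1 t + pvWSum L2 t := by
  simp [pvWSum]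

theorem pv_count_items (t : Int) (m : Int → Nat) (ks : List Int) (hm : ∀ u ∈ ks, 1 ≤ m u) :
    ((pvSA (ks.flatMap (fun v => List.replicate (m v) v))).count t : Int)
      = pvWSum (pvItems (fun u => ((m u : Nat) : Int)) ks) t := by
  induction ks with
  | nil => simp [pvSA_nil, pvItems, pvWSum]
  | cons u ks ih =>
      have hmu : 1 ≤ m u := hm u List.mem_cons_self
      have hm' : ∀ v ∈ ks, 1 ≤ m v := fun v hv => hm v (List.mem_cons_of_mem _ hv)
      rw [List.flatMap_cons, pv_count_peel, pv_count_cross]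
      have happ : pvWSum (pvItems (fun u => ((m u : Nat) : Int)) (u :: ks)) t
          = pvWSum ((if 1 < ((m u : Nat) : Int) then [(pvScoreInt u u, PySem.Int.floordiv (((m u : Nat) : Int) * (((m u : Nat) : Int) - 1)) 2)] else []) : List (Int × Int)) t
            + pvWSum (ks.map (fun v => (pvScoreInt u v, ((m u : Nat) : Int) * ((m v : Nat) : Int)))) t
            + pvWSum (pvItems (fun u => ((m u : Nat) : Int)) ks) t := by
        rw [pvItems, pvWSum_append, pvWSum_append]
      rw [happ, ← ih hm', ← pv_self_cast t u (m u) hmu, ← pv_cross_cast]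
      push_cast
      ring

theorem pv_items_pos (m : Int → Nat) (ks : List Int) (hm : ∀ u ∈ ks, 1 ≤ m u) :
    ∀ p ∈ pvItems (fun u => ((m u : Nat) : Int)) ks, 1 ≤ p.2 := by
  induction ks with
  | nil => intro p hp; simp [pvItems] at hp
  | cons u ks ih =>
      intro p hp
      have hmu : 1 ≤ m u := hm u List.mem_cons_self
      have hm' : ∀ v ∈ ks, 1 ≤ m v := fun v hv => hm v (List.mem_cons_of_mem _ hv)
      simp only [pvItems, List.mem_append] at hp
      rcases hp with (hp | hp) | hp
      · split_ifs at hp with hgt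
        · rw [List.mem_singleton] at hp
          subst hp
          simp only
          have h2 : (2 : Int) ≤ ((m u : Nat) : Int) := by omega
          rw [PySem.Int.le_floordiv_iff_mul_le (by norm_num)]
          nlinarith
        · simp at hp
      · obtain ⟨v, hv, rfl⟩ := List.mem_map.mp hp
        have h1 : (1 : Int) ≤ ((m u : Nat) : Int) := by exact_mod_cast hmu
        have h2 : (1 : Int) ≤ ((m v : Nat) : Int) := by exact_mod_cast hm' v hv
        simp only
        nlinarith
      · exact ih hm' p hp

theorem pv_wsum_nonneg (L : List (Int × Int)) (t : Int) (hw : ∀ p ∈ L, 0 ≤ p.2) :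
    0 ≤ pvWSum L t := by
  apply List.sum_nonneg
  intro x hx
  obtain ⟨p, hp, rfl⟩ := List.mem_map.mp hx
  split_ifs
  · exact hw p hp
  · exact le_refl 0

theorem pv_wsum_mem (L : List (Int × Int)) (t : Int) (hw : ∀ p ∈ L, 1 ≤ p.2) :
    0 < pvWSum L t ↔ t ∈ L.map Prod.fst := by
  induction L with
  | nil => simp [pvWSum]
  | cons p L ih =>
      have hw' : ∀ q ∈ L, 1 ≤ q.2 := fun q hq => hw q (List.mem_cons_of_mem _ hq)
      have hnn : 0 ≤ pvWSum L t := pv_wsum_nonneg L t (fun q hq => le_trans (by norm_num) (hw' q hq))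
      simp only [pvWSum, List.map_cons, List.sum_cons] at ih ⊢
      by_cases hf : p.1 = t
      · have h1 : 1 ≤ p.2 := hw p List.mem_cons_self
        simp only [if_pos hf]
        constructor
        · intro _; exact List.mem_cons.mpr (Or.inl hf.symm)
        · intro _
          simp only [pvWSum] at hnn
          omega
      · simp only [if_neg hf, zero_add, ih hw']
        constructor
        · intro h; exact List.mem_cons_of_mem _ h
        · intro h
          rcases List.mem_cons.mp h with h | h
          · exact absurd h.symm hf
          · exact h

theorem pv_wsum_unit (S : List Int) (t : Int) :
    pvWSum (S.map (fun v => (v, 1))) t = (S.count t : Int) := by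
  induction S with
  | nil => simp [pvWSum]
  | cons x S ih =>
      simp only [pvWSum, List.map_cons, List.sum_cons] at ih ⊢
      rw [List.count_cons, ih]
      by_cases hf : x = t
      · simp [hf]; ring
      · simp [hf]

-- ===== VERDICT (by name: the statement is the Claim_ definition above) =====
theorem acmTeam_spec : Claim_equal_acmTeam := by
  intro topic n _ _
  simp only [Spec_acmTeam]
  set vals := topic.map pvParse2 with hvals
  -- A's streaming pass is the weight-1 fold over the pair-score list
  have hA : acmTeam topic n = ((pvSA vals).map (fun v => (v, (1 : Int)))).foldl pvMergeP (0, 0) := by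
    rw [acmTeam, List.foldl_map, hvals, ← pv_scores_A, List.foldl_map]
    rfl
  -- B's dict is Counter(vals), its loop the weighted fold over pvItems
  have hcntEq : topic.foldl (fun d t => d.insert (pvParse2 t) (d.getD (pvParse2 t) 0 + 1)) PySem.Dict.empty
      = PySem.Dict.counter vals := by
    rw [hvals, ← PySem.Dict.foldl_insert_getD_add_one_eq_counter, List.foldl_map]
  have hB : acmTeam_alt topic n
      = (pvItems (fun u => ((vals.count u : Nat) : Int)) (PySem.List.dedup vals)).foldl pvMergeP (0, 0) := by
    simp only [acmTeam_alt]
    rw [hcntEq, pv_loopB_eq]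
    have harg : (fun u => (PySem.Dict.counter vals).getD u 0) = (fun u => ((vals.count u : Nat) : Int)) := by
      funext u
      exact PySem.Dict.getD_counter vals u
    have hkeys : (PySem.Dict.counter vals).keys = PySem.List.dedup vals := by
      rw [PySem.Dict.keys_counter]
      simp [PySem.List.dedup_eq_ofList]
    rw [harg, hkeys]
  have hm : ∀ u ∈ PySem.List.dedup vals, 1 ≤ vals.count u := by
    intro u hu
    exact List.count_pos_iff.mpr ((PySem.List.mem_dedup vals u).mp hu)
  have hpos := pv_items_pos (fun u => vals.count u) (PySem.List.dedup vals) hm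
  have hcount : ∀ t, ((pvSA vals).count t : Int)
      = pvWSum (pvItems (fun u => ((vals.count u : Nat) : Int)) (PySem.List.dedup vals)) t := by
    intro t
    rw [(pvSA_perm (pv_perm_grouped vals)).count_eq]
    simp only [pvGrouped]
    exact pv_count_items t (fun u => vals.count u) (PySem.List.dedup vals) hm
  rw [hA, hB, pv_wfold_inv, pv_wfold_inv]
  have hL1 : ((pvSA vals).map (fun v => (v, (1 : Int)))).map Prod.fst = pvSA vals := by
    rw [List.map_map]
    exact List.map_congr_left (fun a _ => rfl) |>.trans (List.map_id _)
  have hmax : pvWMax ((pvSA vals).map (fun v => (v, (1 : Int))))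
      = pvWMax (pvItems (fun u => ((vals.count u : Nat) : Int)) (PySem.List.dedup vals)) := by
    unfold pvWMax
    rw [hL1]
    apply pv_max_mem_congr
    intro x
    rw [← List.count_pos_iff]
    constructor
    · intro h
      have : 0 < pvWSum (pvItems (fun u => ((vals.count u : Nat) : Int)) (PySem.List.dedup vals)) x := by
        rw [← hcount x]; exact_mod_cast h
      exact (pv_wsum_mem _ x hpos).mp this
    · intro h
      have := (pv_wsum_mem _ x hpos).mpr h
      rw [← hcount x] at this
      exact_mod_cast this
  rw [hmax, pv_wsum_unit, hcount]
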